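-- pv_equiv track=rewrite | github.com/yena2bell/net_analyzer | network/network_generation.py | check_meaningless_interaction
-- ===== SOURCE A (Python) =====
-- def check_meaningless_interaction(i_Booleantable, i_numinteraction):
--     """return False if some links are meaningless
--     so, choose i_Booleantable have the function value True"""
--     i_numtableline = pow(2,i_numinteraction)
--     b_flag_meaningless_logic = True
--     for i in range(i_numinteraction):
--         j = 0
--         i_interval = pow(2,i)
--         k = j+i_interval
--         b_flag_meaningless_interaction = True #it should be changed to False.
--         while k < i_numtableline and b_flag_meaningless_interaction:
--             b_jthline = (i_Booleantable>>j)%2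
--             b_kthline = (i_Booleantable>>k)%2
--             b_flag_meaningless_interaction = b_flag_meaningless_interaction and (b_jthline == b_kthline)
--             if (k+1) % pow(2,i+1) == 0:
--                 j = k+1
--                 k = j+i_interval
--             else:
--                 j += 1
--                 k += 1
--         #if ith interaction have meaning, then b_flag_meaningless_interacion == False
--         b_flag_meaningless_logic = b_flag_meaningless_logic and not b_flag_meaningless_interaction
--
--     return b_flag_meaningless_logic
-- ===== SOURCE B (Python) =====
-- def check_meaningless_interaction(i_Booleantable, i_numinteraction):
--     """True iff every one of the i_numinteraction input variables actually
--     affects the Boolean table (no variable is meaningless)."""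
--     if i_numinteraction <= 0:
--         return True
--     N = 1 << i_numinteraction
--     for i in range(i_numinteraction):
--         s = 1 << i
--         # variable i is meaningless iff in every 2s-block the lower and upper
--         # half-blocks are equal; compare them in words of up to 64 bits,
--         # short-circuiting on the first difference
--         if all((i_Booleantable >> (2 * s * blk + o)) % (1 << min(64, s - o))
--                == (i_Booleantable >> (2 * s * blk + s + o)) % (1 << min(64, s - o))
--                for blk in range(N >> (i + 1)) for o in range(0, s, 64)):
--             return False  # variable i never changes the output
--     return True
-- ===== Notes on version B (the rewrite author's own statement) =====
-- stated objective: alternative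
-- what changed: A walks each variable's line pairs with a bit-at-a-time while loop over (j,k) cursors; B compares, per variable, the lower and upper half of every 2s-block in machine-word chunks of up to 64 bits (shift+mod), short-circuiting on the first differing word.
import Mathlib
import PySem

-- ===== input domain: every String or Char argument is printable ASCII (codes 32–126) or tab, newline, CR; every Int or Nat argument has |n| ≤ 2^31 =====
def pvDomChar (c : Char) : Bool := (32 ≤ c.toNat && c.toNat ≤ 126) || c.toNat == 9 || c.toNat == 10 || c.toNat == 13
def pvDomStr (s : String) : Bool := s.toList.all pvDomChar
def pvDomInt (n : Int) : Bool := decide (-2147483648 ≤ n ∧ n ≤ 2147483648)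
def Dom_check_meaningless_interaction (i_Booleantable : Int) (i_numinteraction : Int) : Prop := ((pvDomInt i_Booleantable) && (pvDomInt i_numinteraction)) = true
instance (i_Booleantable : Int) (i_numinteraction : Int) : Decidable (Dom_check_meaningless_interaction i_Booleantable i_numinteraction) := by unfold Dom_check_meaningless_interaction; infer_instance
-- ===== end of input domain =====

-- B replaces A's per-variable bit-by-bit while-loop scan by comparing, for each
-- variable i, the two 2^i-bit half-blocks of the table with shift/mod chunk
-- arithmetic (objective: alternative algorithm; same return value everywhere).


-- ===== PORT A =====

-- (i_Booleantable >> sh) % 2 ; every shift amount A uses is ≥ 0, so .toNat is exact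
def pvBitA (t : Int) (sh : Int) : Int :=
  PySem.Int.mod (t >>> sh.toNat) 2

-- A's inner while loop, state (j, k, b_flag_meaningless_interaction)
def pvA_while (t N : Int) (i : Nat) (j k : Int) (flag : Bool) : Bool :=
  if h : k < N ∧ flag = true then
    if PySem.Int.mod (k + 1) ((2:Int) ^ (i + 1)) == 0 then
      pvA_while t N i (k + 1) (k + 1 + (2:Int) ^ i) (flag && (pvBitA t j == pvBitA t k))
    else
      pvA_while t N i (j + 1) (k + 1) (flag && (pvBitA t j == pvBitA t k))
  else flag
termination_by (N - k).toNat
decreasing_by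
  all_goals (have hp : (0:Int) < 2 ^ i := pow_pos (by norm_num) i; omega)

def check_meaningless_interaction (i_Booleantable : Int) (i_numinteraction : Int) : Bool :=
  -- pow(2, i_numinteraction): only read when the for-range below is nonempty
  -- (i_numinteraction > 0), where .toNat is exact
  let i_numtableline : Int := (2:Int) ^ i_numinteraction.toNat
  (PySem.List.pyRange 0 i_numinteraction 1).foldl
    (fun b_flag_meaningless_logic i =>
      b_flag_meaningless_logic &&
        !(pvA_while i_Booleantable i_numtableline i.toNat 0 (0 + (2:Int) ^ i.toNat) true))
    true

-- ===== PORT B =====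

-- the inner 'for o in range(0, s, 64)' of B's generator: compare the half-blocks
-- starting at bits a and b word by word ((t >> (a+o)) % (1 << min(64, s-o)) == ...),
-- short-circuiting like all(...)
def pvB_half (t : Int) (a b s : Nat) (o : Nat) : Bool :=
  if _h : o < s then
    if PySem.Int.mod (t >>> (a + o)) ((2:Int) ^ (min 64 (s - o)))
        == PySem.Int.mod (t >>> (b + o)) ((2:Int) ^ (min 64 (s - o)))
    then pvB_half t a b s (o + 64)
    else false
  else true
termination_by s - o
decreasing_by omega

-- the outer 'for blk in range(N >> (i+1))' of B's generator
def pvB_blocks (t : Int) (s M : Nat) (blk : Nat) : Bool :=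
  if _h : blk < M then
    if pvB_half t (2 * s * blk) (2 * s * blk + s) s 0 then pvB_blocks t s M (blk + 1)
    else false
  else true
termination_by M - blk
decreasing_by omega

def check_meaningless_interaction_alt (i_Booleantable : Int) (i_numinteraction : Int) : Bool :=
  if i_numinteraction ≤ 0 then true
  else
    let N : Nat := 2 ^ i_numinteraction.toNat
    (List.range i_numinteraction.toNat).all fun i =>
      ! pvB_blocks i_Booleantable (2 ^ i) (N >>> (i + 1)) 0

-- ===== PRECONDITION & SPEC =====
def Spec_check_meaningless_interaction (i_Booleantable : Int) (i_numinteraction : Int) (out : Bool) : Prop := out = check_meaningless_interaction_alt i_Booleantable i_numinteraction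
instance (i_Booleantable : Int) (i_numinteraction : Int) (out : Bool) : Decidable (Spec_check_meaningless_interaction i_Booleantable i_numinteraction out) := by unfold Spec_check_meaningless_interaction; infer_instance

-- ===== CLAIM (what is proved, stated in full; the proofs are below) =====
def Claim_equal_check_meaningless_interaction : Prop := ∀ (i_Booleantable : Int) (i_numinteraction : Int), Dom_check_meaningless_interaction i_Booleantable i_numinteraction → Spec_check_meaningless_interaction i_Booleantable i_numinteraction (check_meaningless_interaction i_Booleantable i_numinteraction)

-- ===== LEMMAS AND PROOFS =====

-- "variable i is meaningless from position j on": all later valid pairs of lines agree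
def pvAok (t N : Int) (i : Nat) (j : Int) : Prop :=
  ∀ m : Int, j ≤ m → m % (2:Int) ^ (i + 1) < (2:Int) ^ i → m + (2:Int) ^ i < N →
    pvBitA t m = pvBitA t (m + (2:Int) ^ i)

theorem pvA_while_false (t N : Int) (i : Nat) (j k : Int) :
    pvA_while t N i j k false = false := by
  rw [pvA_while]; simp

-- A's while loop from a valid position j tests exactly the valid pairs from j on
theorem pvA_while_char (t N : Int) (i : Nat) :
    ∀ j : Int, 0 ≤ j → j % (2:Int) ^ (i + 1) < (2:Int) ^ i →
      (pvA_while t N i j (j + (2:Int) ^ i) true = true ↔ pvAok t N i j) := by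
  have hs : (0:Int) < 2 ^ i := pow_pos (by norm_num) i
  have hP : (0:Int) < 2 ^ (i + 1) := pow_pos (by norm_num) (i + 1)
  have hPs : (2:Int) ^ (i + 1) = 2 * 2 ^ i := by rw [pow_succ]; ring
  suffices H : ∀ f : Nat, ∀ j : Int, (N - (j + 2 ^ i)).toNat = f → 0 ≤ j →
      j % (2:Int) ^ (i + 1) < (2:Int) ^ i →
      (pvA_while t N i j (j + (2:Int) ^ i) true = true ↔ pvAok t N i j) by
    intro j hj hv; exact H _ j rfl hj hv
  intro f
  induction f using Nat.strong_induction_on with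
  | _ f IH =>
    intro j hf hj hv
    rw [pvA_while]
    by_cases hk : j + (2:Int) ^ i < N
    · rw [dif_pos ⟨hk, rfl⟩]
      rw [PySem.Int.mod_eq_emod_of_pos hP]
      set P : Int := (2:Int) ^ (i + 1) with hPdef
      have hqr : P * (j / P) + j % P = j := Int.mul_ediv_add_emod j P
      set q : Int := j / P with hq
      set r : Int := j % P with hr
      have hr0 : 0 ≤ r := Int.emod_nonneg j (ne_of_gt hP)
      have hrP : r < P := Int.emod_lt_of_pos j hP
      have e1 : (j + 2 ^ i + 1) % P = (r + 2 ^ i + 1) % P := by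
        have h2 : j + 2 ^ i + 1 = (r + 2 ^ i + 1) + P * q := by linarith
        rw [h2, Int.add_mul_emod_self_left]
      by_cases hbit : pvBitA t j = pvBitA t (j + 2 ^ i)
      · have hflag : (pvBitA t j == pvBitA t (j + 2 ^ i)) = true := by
          simp [hbit]
        simp only [hflag, Bool.true_and]
        by_cases hbr : (j + 2 ^ i + 1) % P = 0
        · rw [if_pos (by simp [hbr])]
          have hre : r = 2 ^ i - 1 := by
            rw [e1] at hbr
            by_cases hlt : r + 2 ^ i + 1 < P
            · rw [Int.emod_eq_of_lt (by omega) hlt] at hbr; omega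
            · omega
          have hvr : (j + 2 ^ i + 1) % P < 2 ^ i := by rw [hbr]; exact hs
          rw [IH _ (by omega) (j + 2 ^ i + 1) rfl (by omega) hvr]
          constructor
          · intro hok m hm hvm hN
            by_cases hmj : m = j
            · subst hmj; exact hbit
            · by_cases hm2 : j + 2 ^ i + 1 ≤ m
              · exact hok m hm2 hvm hN
              · exfalso
                rw [← hPdef] at hvm
                have h3 : m = (m - j + r) + P * q := by linarith
                have h4 : m % P = m - j + r := by
                  conv_lhs => rw [h3]
                  rw [Int.add_mul_emod_self_left,
                    Int.emod_eq_of_lt (by omega) (by omega)]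
                omega
          · intro hok m hm hvm hN
            exact hok m (by omega) hvm hN
        · rw [if_neg (by simp [hbr])]
          rw [e1] at hbr
          have hrne : r ≠ 2 ^ i - 1 := by
            intro hre
            apply hbr
            have : r + 2 ^ i + 1 = P := by omega
            rw [this, Int.emod_self]
          have harg : j + 2 ^ i + 1 = (j + 1) + 2 ^ i := by ring
          rw [harg]
          have hv1 : (j + 1) % P < 2 ^ i := by
            have h3 : j + 1 = (r + 1) + P * q := by linarith
            rw [h3, Int.add_mul_emod_self_left,
              Int.emod_eq_of_lt (by omega) (by omega)]
            omega
          rw [IH _ (by omega) (j + 1) rfl (by omega) hv1]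
          constructor
          · intro hok m hm hvm hN
            by_cases hmj : m = j
            · subst hmj; exact hbit
            · exact hok m (by omega) hvm hN
          · intro hok m hm hvm hN
            exact hok m (by omega) hvm hN
      · have hflag : (pvBitA t j == pvBitA t (j + 2 ^ i)) = false := by
          simp [hbit]
        simp only [hflag, Bool.true_and]
        have hfalse : (if ((j + 2 ^ i + 1) % P == 0) = true then
            pvA_while t N i (j + 2 ^ i + 1) (j + 2 ^ i + 1 + 2 ^ i) false
          else pvA_while t N i (j + 1) (j + 2 ^ i + 1) false) = false := by
          split <;> rw [pvA_while_false]
        rw [hfalse]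
        simp only [Bool.false_eq_true, false_iff]
        intro hok
        exact hbit (hok j le_rfl hv hk)
    · rw [dif_neg (by simp [hk])]
      simp only [true_iff]
      intro m hm hvm hN
      exfalso
      have : (0:Int) ≤ m % (2:Int) ^ (i + 1) := Int.emod_nonneg m (ne_of_gt hP)
      omega

-- the masked table i_Booleantable % 2^Nn, as a natural number
def pvTbl (t : Int) (Nn : Nat) : Nat := (PySem.Int.mod t ((2:Int) ^ Nn)).toNat

theorem pvTbl_cast (t : Int) (Nn : Nat) :
    (pvTbl t Nn : Int) = t % (2:Int) ^ Nn := by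
  rw [pvTbl, PySem.Int.mod_eq_emod_of_pos (pow_pos (by norm_num) Nn)]
  exact Int.toNat_of_nonneg (Int.emod_nonneg t (by positivity))

-- an s-bit chunk of the Python table read at bit a equals the same chunk of the
-- masked Nat table, provided the chunk lies below the modulus 2^Nn
theorem pv_chunkI_eq (t : Int) (Nn a s : Nat) (h : a + s ≤ Nn) :
    PySem.Int.mod (t >>> a) ((2:Int) ^ s)
      = (((pvTbl t Nn) / 2 ^ a % 2 ^ s : Nat) : Int) := by
  have h2s : (0:Int) < 2 ^ s := pow_pos (by norm_num) s
  rw [Int.shiftRight_eq_div_pow, PySem.Int.mod_eq_emod_of_pos h2s,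
    show ((2 ^ a : Nat) : Int) = (2:Int) ^ a by push_cast; ring]
  have hx : (pvTbl t Nn : Int) = t % (2:Int) ^ Nn := pvTbl_cast t Nn
  have hsplit : t = (pvTbl t Nn : Int) + ((2:Int) ^ (Nn - a - s) * (t / 2 ^ Nn) * 2 ^ s) * 2 ^ a := by
    have hme := Int.emod_add_mul_ediv t ((2:Int) ^ Nn)
    have hpow : (2:Int) ^ (Nn - a - s) * 2 ^ s * 2 ^ a = 2 ^ Nn := by
      rw [← pow_add, ← pow_add]
      congr 1
      omega
    rw [hx]
    linear_combination - hme - (t / 2 ^ Nn) * hpow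
  calc t / 2 ^ a % 2 ^ s
      = ((pvTbl t Nn : Int) + ((2:Int) ^ (Nn - a - s) * (t / 2 ^ Nn) * 2 ^ s) * 2 ^ a) / 2 ^ a % 2 ^ s := by
        rw [← hsplit]
    _ = ((pvTbl t Nn : Int) / 2 ^ a + (2:Int) ^ (Nn - a - s) * (t / 2 ^ Nn) * 2 ^ s) % 2 ^ s := by
        rw [Int.add_mul_ediv_right _ _ (ne_of_gt (pow_pos (by norm_num : (0:Int) < 2) a))]
    _ = ((pvTbl t Nn : Int) / 2 ^ a + 2 ^ s * ((2:Int) ^ (Nn - a - s) * (t / 2 ^ Nn))) % 2 ^ s := by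
        ring_nf
    _ = (pvTbl t Nn : Int) / 2 ^ a % 2 ^ s := Int.add_mul_emod_self_left _ _ _
    _ = (((pvTbl t Nn) / 2 ^ a % 2 ^ s : Nat) : Int) := by push_cast; ring

-- bit m of the Python table equals bit m of the masked Nat table, for m below the modulus
theorem pvBitA_eq (t : Int) (Nn m : Nat) (h : m < Nn) :
    pvBitA t (m : Int) = ((pvTbl t Nn) / 2 ^ m % 2 : Nat) := by
  have := pv_chunkI_eq t Nn m 1 (by omega)
  rw [pvBitA, Int.toNat_natCast]
  simpa [pow_one] using this

theorem pv_testBit_iff_bit (x a b : Nat) :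
    x / 2 ^ a % 2 = x / 2 ^ b % 2 ↔ x.testBit a = x.testBit b := by
  have ha : x / 2 ^ a % 2 < 2 := Nat.mod_lt _ (by norm_num)
  have hb : x / 2 ^ b % 2 < 2 := Nat.mod_lt _ (by norm_num)
  simp only [Nat.testBit_eq_decide_div_mod_eq, decide_eq_decide]
  omega

-- equality of two s-bit chunks ↔ pointwise equality of their bits
theorem pv_chunk_iff (x s a b : Nat) :
    x / 2 ^ a % 2 ^ s = x / 2 ^ b % 2 ^ s ↔
      ∀ r < s, x.testBit (a + r) = x.testBit (b + r) := by
  constructor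
  · intro h r hr
    have ha := congrArg (fun y => Nat.testBit y r) h
    simpa [Nat.testBit_mod_two_pow, Nat.testBit_div_two_pow, hr, Nat.add_comm] using ha
  · intro h
    apply Nat.eq_of_testBit_eq
    intro r
    by_cases hr : r < s
    · simp [Nat.testBit_mod_two_pow, Nat.testBit_div_two_pow, hr, Nat.add_comm, h r hr]
    · simp [Nat.testBit_mod_two_pow, hr]

-- the word loop compares exactly the bits r ∈ [o, s) of the two half-blocks
theorem pvB_half_char (t : Int) (nn A B s : Nat) (hA : A + s ≤ 2 ^ nn) (hB : B + s ≤ 2 ^ nn) :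
    ∀ o, (pvB_half t A B s o = true ↔
      ∀ r, o ≤ r → r < s →
        (pvTbl t (2 ^ nn)).testBit (A + r) = (pvTbl t (2 ^ nn)).testBit (B + r)) := by
  suffices H : ∀ f o, s - o = f → (pvB_half t A B s o = true ↔
      ∀ r, o ≤ r → r < s →
        (pvTbl t (2 ^ nn)).testBit (A + r) = (pvTbl t (2 ^ nn)).testBit (B + r)) by
    intro o; exact H _ o rfl
  intro f
  induction f using Nat.strong_induction_on with
  | _ f IH =>
    intro o hf
    rw [pvB_half]
    by_cases ho : o < s
    · rw [dif_pos ho]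
      set w := min 64 (s - o) with hwdef
      have hwordA := pv_chunkI_eq t (2 ^ nn) (A + o) w (by omega)
      have hwordB := pv_chunkI_eq t (2 ^ nn) (B + o) w (by omega)
      set x := pvTbl t (2 ^ nn) with hxdef
      have hcond : (PySem.Int.mod (t >>> (A + o)) ((2:Int) ^ w)
            == PySem.Int.mod (t >>> (B + o)) ((2:Int) ^ w)) = true ↔
          ∀ r' < w, x.testBit (A + o + r') = x.testBit (B + o + r') := by
        rw [beq_iff_eq, hwordA, hwordB, Int.natCast_inj, pv_chunk_iff]
      by_cases hw : (PySem.Int.mod (t >>> (A + o)) ((2:Int) ^ w)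
            == PySem.Int.mod (t >>> (B + o)) ((2:Int) ^ w)) = true
      · rw [if_pos hw, IH (s - (o + 64)) (by omega) (o + 64) rfl]
        have hwin := hcond.mp hw
        constructor
        · intro hrec r hor hrs
          by_cases hr64 : r < o + 64
          · have := hwin (r - o) (by omega)
            rw [show A + o + (r - o) = A + r by omega,
              show B + o + (r - o) = B + r by omega] at this
            exact this
          · exact hrec r (by omega) hrs
        · intro hall r hor hrs
          exact hall r (by omega) hrs
      · rw [if_neg hw]
        simp only [Bool.false_eq_true, false_iff]
        intro hall
        apply hw
        rw [hcond]
        intro r' hr'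
        have := hall (o + r') (by omega) (by omega)
        rw [show A + (o + r') = A + o + r' by omega,
          show B + (o + r') = B + o + r' by omega] at this
        exact this
    · rw [dif_neg ho]
      simp only [true_iff]
      intro r hor hrs
      omega

-- the block loop compares exactly the half-block pairs from block b0 on
theorem pvB_blocks_char (t : Int) (nn i : Nat) (hi : i < nn) :
    ∀ b0, (pvB_blocks t (2 ^ i) (2 ^ (nn - (i + 1))) b0 = true ↔
      ∀ blk, b0 ≤ blk → blk < 2 ^ (nn - (i + 1)) → ∀ r < 2 ^ i,
        (pvTbl t (2 ^ nn)).testBit (2 * 2 ^ i * blk + r)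
          = (pvTbl t (2 ^ nn)).testBit (2 * 2 ^ i * blk + 2 ^ i + r)) := by
  have hN : 2 * 2 ^ i * 2 ^ (nn - (i + 1)) = 2 ^ nn := by
    rw [show 2 * 2 ^ i = 2 ^ (i + 1) by rw [pow_succ]; ring, ← pow_add]
    congr 1
    omega
  suffices H : ∀ f b0, 2 ^ (nn - (i + 1)) - b0 = f → (pvB_blocks t (2 ^ i) (2 ^ (nn - (i + 1))) b0 = true ↔
      ∀ blk, b0 ≤ blk → blk < 2 ^ (nn - (i + 1)) → ∀ r < 2 ^ i,
        (pvTbl t (2 ^ nn)).testBit (2 * 2 ^ i * blk + r)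
          = (pvTbl t (2 ^ nn)).testBit (2 * 2 ^ i * blk + 2 ^ i + r)) by
    intro b0; exact H _ b0 rfl
  intro f
  induction f using Nat.strong_induction_on with
  | _ f IH =>
    intro b0 hf
    rw [pvB_blocks]
    by_cases hb : b0 < 2 ^ (nn - (i + 1))
    · rw [dif_pos hb]
      have hmul : 2 * 2 ^ i * (b0 + 1) ≤ 2 * 2 ^ i * 2 ^ (nn - (i + 1)) :=
        Nat.mul_le_mul_left _ (by omega)
      have hexp : 2 * 2 ^ i * (b0 + 1) = 2 * 2 ^ i * b0 + 2 * 2 ^ i := by ring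
      have hhalf := pvB_half_char t nn (2 * 2 ^ i * b0) (2 * 2 ^ i * b0 + 2 ^ i) (2 ^ i)
        (by omega) (by omega) 0
      by_cases hcur : pvB_half t (2 * 2 ^ i * b0) (2 * 2 ^ i * b0 + 2 ^ i) (2 ^ i) 0 = true
      · rw [if_pos hcur, IH (2 ^ (nn - (i + 1)) - (b0 + 1)) (by omega) (b0 + 1) rfl]
        have hwin := hhalf.mp hcur
        constructor
        · intro hrec blk hle hlt r hr
          by_cases hbb : blk = b0
          · subst hbb
            exact hwin r (by omega) hr
          · exact hrec blk (by omega) hlt r hr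
        · intro hall blk hle hlt r hr
          exact hall blk (by omega) hlt r hr
      · rw [if_neg hcur]
        simp only [Bool.false_eq_true, false_iff]
        intro hall
        apply hcur
        rw [hhalf]
        intro r _ hr
        exact hall b0 le_rfl hb r hr
    · rw [dif_neg hb]
      simp only [true_iff]
      intro blk hle hlt r hr
      omega

theorem pvAok_iff_nat (t : Int) (nn i : Nat) :
    pvAok t ((2:Int) ^ nn) i 0 ↔
      ∀ m : Nat, m % 2 ^ (i + 1) < 2 ^ i → m + 2 ^ i < 2 ^ nn →
        (pvTbl t (2 ^ nn)).testBit m = (pvTbl t (2 ^ nn)).testBit (m + 2 ^ i) := by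
  constructor
  · intro h m hvm hlt
    have h1 := h (m : Int) (by positivity)
      (by exact_mod_cast hvm)
      (by exact_mod_cast hlt)
    rw [pvBitA_eq t (2 ^ nn) m (by omega)] at h1
    rw [show ((m : Int) + (2:Int) ^ i) = ((m + 2 ^ i : Nat) : Int) by push_cast; ring,
      pvBitA_eq t (2 ^ nn) (m + 2 ^ i) (by omega)] at h1
    rw [← pv_testBit_iff_bit]
    exact_mod_cast h1
  · intro h m hm hvm hlt
    obtain ⟨m', rfl⟩ := Int.eq_ofNat_of_zero_le hm
    have hvm' : m' % 2 ^ (i + 1) < 2 ^ i := by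
      rw [show ((m' : Int)) % (2:Int) ^ (i + 1) = ((m' % 2 ^ (i + 1) : Nat) : Int) by
        push_cast; ring] at hvm
      exact_mod_cast hvm
    have hlt' : m' + 2 ^ i < 2 ^ nn := by
      rw [show ((m' : Int)) + (2:Int) ^ i = ((m' + 2 ^ i : Nat) : Int) by push_cast; ring] at hlt
      exact_mod_cast hlt
    have h1 := h m' hvm' hlt'
    rw [← pv_testBit_iff_bit] at h1
    rw [pvBitA_eq t (2 ^ nn) m' (by omega),
      show ((m' : Int) + (2:Int) ^ i) = ((m' + 2 ^ i : Nat) : Int) by push_cast; ring,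
      pvBitA_eq t (2 ^ nn) (m' + 2 ^ i) (by omega)]
    exact_mod_cast h1

-- positions j with j mod 2s < s are exactly the 2s*blk + r, r < s
theorem pv_bij (s M : Nat) (hs : 0 < s) (Pb : Nat → Prop) :
    (∀ m : Nat, m % (2 * s) < s → m + s < 2 * s * M → Pb m) ↔
      (∀ blk < M, ∀ r < s, Pb (2 * s * blk + r)) := by
  constructor
  · intro h blk hblk r hr
    have hmul : 2 * s * (blk + 1) ≤ 2 * s * M := Nat.mul_le_mul_left _ (by omega)
    have hexp : 2 * s * (blk + 1) = 2 * s * blk + 2 * s := by ring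
    apply h
    · rw [Nat.mul_add_mod, Nat.mod_eq_of_lt (by omega)]; exact hr
    · omega
  · intro h m hm hlt
    have hd := Nat.div_add_mod m (2 * s)
    have hblk : m / (2 * s) < M := by
      by_contra hc
      have : 2 * s * M ≤ 2 * s * (m / (2 * s)) := Nat.mul_le_mul_left _ (by omega)
      omega
    have := h (m / (2 * s)) hblk (m % (2 * s)) hm
    rwa [hd] at this

-- per-variable agreement of the two programs
theorem pv_inner_eq (t : Int) (nn i : Nat) (hi : i < nn) :
    pvA_while t ((2:Int) ^ nn) i 0 ((2:Int) ^ i) true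
      = pvB_blocks t (2 ^ i) (2 ^ nn >>> (i + 1)) 0 := by
  have hM : 2 ^ nn >>> (i + 1) = 2 ^ (nn - (i + 1)) := by
    rw [Nat.shiftRight_eq_div_pow, Nat.pow_div (by omega) (by norm_num)]
  have hN : 2 * 2 ^ i * 2 ^ (nn - (i + 1)) = 2 ^ nn := by
    rw [show 2 * 2 ^ i = 2 ^ (i + 1) by rw [pow_succ]; ring, ← pow_add]
    congr 1
    omega
  rw [Bool.eq_iff_iff]
  rw [show ((2:Int) ^ i) = (0:Int) + (2:Int) ^ i by ring]
  rw [pvA_while_char t ((2:Int) ^ nn) i 0 le_rfl (by rw [Int.zero_emod]; positivity)]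
  rw [pvAok_iff_nat, hM, pvB_blocks_char t nn i hi 0]
  set x := pvTbl t (2 ^ nn) with hxdef
  have h21 : (2:Nat) ^ (i + 1) = 2 * 2 ^ i := by rw [pow_succ]; ring
  have hkey : (∀ m : Nat, m % 2 ^ (i + 1) < 2 ^ i → m + 2 ^ i < 2 ^ nn →
        x.testBit m = x.testBit (m + 2 ^ i)) ↔
      (∀ blk < 2 ^ (nn - (i + 1)), ∀ r < 2 ^ i,
        x.testBit (2 * 2 ^ i * blk + r) = x.testBit (2 * 2 ^ i * blk + r + 2 ^ i)) := by
    simp only [h21, ← hN]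
    exact pv_bij (2 ^ i) (2 ^ (nn - (i + 1))) (pow_pos (by norm_num) i) _
  rw [hkey]
  constructor
  · intro h blk hle hlt r hr
    rw [show 2 * 2 ^ i * blk + 2 ^ i + r = 2 * 2 ^ i * blk + r + 2 ^ i by ring]
    exact h blk hlt r hr
  · intro h blk hlt r hr
    have := h blk (by omega) hlt r hr
    rw [show 2 * 2 ^ i * blk + 2 ^ i + r = 2 * 2 ^ i * blk + r + 2 ^ i by ring] at this
    exact this

theorem pv_foldl_all {α : Type} (g : α → Bool) : ∀ (l : List α) (b : Bool),
    l.foldl (fun f x => f && g x) b = (b && l.all g)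
  | [], b => by simp
  | a :: l, b => by
    rw [List.foldl_cons, pv_foldl_all g l (b && g a), List.all_cons]
    cases b <;> simp

theorem pv_all_congr {α : Type} (l : List α) (f g : α → Bool)
    (h : ∀ x ∈ l, f x = g x) : l.all f = l.all g := by
  induction l with
  | nil => rfl
  | cons a l ih =>
    rw [List.all_cons, List.all_cons, h a (by simp), ih (fun x hx => h x (by simp [hx]))]

-- ===== VERDICT (by name: the statement is the Claim_ definition above) =====
theorem check_meaningless_interaction_spec : Claim_equal_check_meaningless_interaction := by
  intro t n _hdom
  unfold Spec_check_meaningless_interaction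
  simp only [check_meaningless_interaction, check_meaningless_interaction_alt]
  by_cases hn : n ≤ 0
  · rw [if_pos hn, PySem.List.pyRange_one_eq_nil hn]
    rfl
  · rw [if_neg hn]
    rw [PySem.List.pyRange_one, sub_zero, List.foldl_map, pv_foldl_all, Bool.true_and]
    apply pv_all_congr
    intro k hk
    rw [List.mem_range] at hk
    simp only [zero_add, Int.toNat_natCast]
    rw [pv_inner_eq t n.toNat k hk]
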